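-- pv_equiv track=rewrite | github.com/matteosecco/pitch_recognition | audioedit.py | freqcalc
-- ===== SOURCE A (Python) =====
-- import math
--
-- def freqcalc(l):
--     """ Calculates the frequence of a list of samples
--         frequency is defined as the distance (number of samples) between
--         a zero and another
--
--         l: list of wave frames
--         returns: list containing a value of frequency (actually wavelenght)
--         for each value """
--
--     # where to save the frequencies
--     freq_list = []
--     # current count
--     count = 0
--     # current sign
--     sign = 1.0
--
--     for el in l:
--
--         if math.copysign(1, el) != sign:
--             sign = math.copysign(1, el)
--             freq_list.extend([count]*count)  # per hertz: 44100/ count+1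
--             count = 0
--
--         count += 1
--
--     freq_list.extend([count]*count)
--
--     return freq_list
-- ===== SOURCE B (Python) =====
-- def freqcalc(l):
--     """Per-sample formula: out[i] is the length of the same-sign run containing
--     sample i, computed as (1-based distance from the run's start, via a forward
--     prefix scan) plus (distance to the run's end, via a backward suffix scan)."""
--     signs = [x >= 0 for x in l]
--     n = len(l)
--     left = [0] * n   # left[i]: 1-based distance from the start of i's run
--     for i in range(n):
--         left[i] = left[i - 1] + 1 if i > 0 and signs[i] == signs[i - 1] else 1
--     right = [0] * n  # right[i]: distance from i to the end of i's run
--     for i in range(n - 2, -1, -1):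
--         if signs[i] == signs[i + 1]:
--             right[i] = right[i + 1] + 1
--     return [left[i] + right[i] for i in range(n)]
-- ===== Notes on version B (the rewrite author's own statement) =====
-- stated objective: alternative
-- what changed: Replaces A's single-pass state machine (current sign + count, flushing count copies of count on each sign flip) by a per-sample formula: out[i] = length of the same-sign run containing sample i, computed as a forward prefix-distance scan plus a backward suffix-distance scan, summed pointwise.
import Mathlib
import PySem

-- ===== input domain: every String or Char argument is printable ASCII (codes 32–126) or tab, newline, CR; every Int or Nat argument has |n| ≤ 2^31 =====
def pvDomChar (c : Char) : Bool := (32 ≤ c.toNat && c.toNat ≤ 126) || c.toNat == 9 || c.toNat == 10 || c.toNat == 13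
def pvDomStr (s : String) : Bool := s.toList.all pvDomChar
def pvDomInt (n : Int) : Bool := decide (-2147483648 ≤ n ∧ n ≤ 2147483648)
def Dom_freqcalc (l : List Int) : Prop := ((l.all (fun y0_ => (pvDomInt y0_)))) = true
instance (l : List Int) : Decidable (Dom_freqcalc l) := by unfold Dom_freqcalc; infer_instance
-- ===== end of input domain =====

-- B replaces A's sign/count state machine by a per-sample formula (prefix-distance scan +
-- suffix-distance scan, summed pointwise); same cost, different algorithm (objective: alternative).

-- ===== PORT A =====
-- math.copysign(1, el) for an Int el is 1.0 iff 0 ≤ el (ints never give -0.0);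
-- the sign is represented as the Bool (0 ≤ el).  [count]*count is replicate count.toNat count
-- (both empty for count ≤ 0).  Fold state: (freq_list, count, sign).
def freqcalc (l : List Int) : List Int :=
  let st := l.foldl (fun (s : List Int × Int × Bool) el =>
    let sgn := decide (0 ≤ el)
    if sgn ≠ s.2.2 then
      (s.1 ++ List.replicate s.2.1.toNat s.2.1, 0 + 1, sgn)
    else
      (s.1, s.2.1 + 1, s.2.2)) ([], 0, true)
  st.1 ++ List.replicate st.2.1.toNat st.2.1

-- ===== PORT B =====
-- signs = [x >= 0 for x in l]
def pySigns (l : List Int) : List Bool := l.map (fun x => decide (0 ≤ x))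

-- forward scan: left[i] = left[i-1] + 1 if signs[i] == signs[i-1] else 1
-- (the accumulator c carries left[i-1], prev carries signs[i-1]).
def leftScan : Option Bool → Int → List Bool → List Int
  | _, _, [] => []
  | prev, c, s :: rest =>
      let c' := if prev = some s then c + 1 else 1
      c' :: leftScan (some s) c' rest

-- backward scan: right[i] = right[i+1] + 1 if signs[i] == signs[i+1] else 0
def rightScan : List Bool → List Int
  | [] => []
  | [_] => [0]
  | s :: s' :: r =>
      (if s = s' then (rightScan (s' :: r)).headD 0 + 1 else 0) :: rightScan (s' :: r)

-- return [left[i] + right[i] for i in range(n)]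
def freqcalc_alt (l : List Int) : List Int :=
  List.zipWith (· + ·) (leftScan none 0 (pySigns l)) (rightScan (pySigns l))

-- ===== PRECONDITION & SPEC =====
def Spec_freqcalc (l : List Int) (out : List Int) : Prop := out = freqcalc_alt l
instance (l : List Int) (out : List Int) : Decidable (Spec_freqcalc l out) := by unfold Spec_freqcalc; infer_instance

-- ===== CLAIM (what is proved, stated in full; the proofs are below) =====
def Claim_equal_freqcalc : Prop := ∀ (l : List Int), Dom_freqcalc l → Spec_freqcalc l (freqcalc l)

-- ===== LEMMAS AND PROOFS =====

-- A's fold body, named.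
def stepA (s : List Int × Int × Bool) (el : Int) : List Int × Int × Bool :=
  let sgn := decide (0 ≤ el)
  if sgn ≠ s.2.2 then (s.1 ++ List.replicate s.2.1.toNat s.2.1, 0 + 1, sgn)
  else (s.1, s.2.1 + 1, s.2.2)

-- A's tail behaviour expressed over the sign list: current count c, current sign b.
def goA : List Bool → Int → Bool → List Int
  | [], c, _ => List.replicate c.toNat c
  | s :: rest, c, b =>
      if s = b then goA rest (c + 1) b
      else List.replicate c.toNat c ++ goA rest 1 s

def runOut : List Bool → List Int
  | [] => []
  | s :: rest => goA rest 1 s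

-- [c+1, c+2, ..., c+k]
def ascFrom : Int → Nat → List Int
  | _, 0 => []
  | c, k + 1 => (c + 1) :: ascFrom (c + 1) k

-- [k-1, k-2, ..., 0]
def descInts : Nat → List Int
  | 0 => []
  | k + 1 => (k : Int) :: descInts k

lemma A_fold (l : List Int) : ∀ (acc : List Int) (c : Int) (b : Bool),
    (let st := l.foldl stepA (acc, c, b)
     st.1 ++ List.replicate st.2.1.toNat st.2.1) = acc ++ goA (pySigns l) c b := by
  induction l with
  | nil => intro acc c b; simp [pySigns, goA]
  | cons el l ih =>
      intro acc c b
      by_cases h : decide (0 ≤ el) = b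
      · simp only [List.foldl_cons, pySigns, List.map_cons, goA, h]
        have hst : stepA (acc, c, b) el = (acc, c + 1, b) := by simp [stepA, h]
        rw [hst]
        simpa [pySigns] using ih acc (c + 1) b
      · simp only [List.foldl_cons, pySigns, List.map_cons, goA, if_neg h]
        have hst : stepA (acc, c, b) el
            = (acc ++ List.replicate c.toNat c, 0 + 1, decide (0 ≤ el)) := by
          simp [stepA]; intro hb; exact absurd hb h
        rw [hst]
        simpa [pySigns] using ih (acc ++ List.replicate c.toNat c) (0 + 1) (decide (0 ≤ el))

lemma goA_zero (ss : List Bool) : goA ss 0 true = runOut ss := by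
  cases ss with
  | nil => simp [goA, runOut]
  | cons s rest => cases s <;> simp [goA, runOut]

lemma freqcalc_eq_runOut (l : List Int) : freqcalc l = runOut (pySigns l) := by
  have h : (let st := l.foldl stepA ([], 0, true)
            st.1 ++ List.replicate st.2.1.toNat st.2.1) = [] ++ goA (pySigns l) 0 true :=
    A_fold l [] 0 true
  calc freqcalc l
      = (let st := l.foldl stepA ([], 0, true)
         st.1 ++ List.replicate st.2.1.toNat st.2.1) := rfl
    _ = [] ++ goA (pySigns l) 0 true := h
    _ = runOut (pySigns l) := by rw [goA_zero]; simp

lemma goA_run : ∀ (k : Nat) (c : Int) (b : Bool) (rest : List Bool),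
    rest.head? ≠ some b →
    goA (List.replicate k b ++ rest) c b
      = List.replicate (c + k).toNat (c + k) ++ runOut rest := by
  intro k
  induction k with
  | zero =>
      intro c b rest h
      cases rest with
      | nil => simp [goA, runOut]
      | cons s r =>
          have hs : s ≠ b := by intro e; exact h (by simp [e])
          simp [goA, runOut, hs]
  | succ k ih =>
      intro c b rest h
      have h1 : goA (List.replicate (k + 1) b ++ rest) c b
          = goA (List.replicate k b ++ rest) (c + 1) b := by
        simp [List.replicate_succ, goA]
      rw [h1, ih (c + 1) b rest h]
      have h2 : c + 1 + (k : Int) = c + ((k : Nat) + 1 : Nat) := by push_cast; ring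
      rw [h2]

lemma leftScan_restart (b : Bool) (c : Int) (rest : List Bool)
    (h : rest.head? ≠ some b) : leftScan (some b) c rest = leftScan none 0 rest := by
  cases rest with
  | nil => rfl
  | cons s r =>
      have hs : b ≠ s := by intro e; exact h (by simp [e])
      simp [leftScan, hs]

lemma leftScan_run : ∀ (k : Nat) (c : Int) (b : Bool) (rest : List Bool),
    leftScan (some b) c (List.replicate k b ++ rest)
      = ascFrom c k ++ leftScan (some b) (c + k) rest := by
  intro k
  induction k with
  | zero => intro c b rest; simp [ascFrom]
  | succ k ih =>
      intro c b rest
      rw [List.replicate_succ, List.cons_append]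
      have h1 : leftScan (some b) c (b :: (List.replicate k b ++ rest))
          = (c + 1) :: leftScan (some b) (c + 1) (List.replicate k b ++ rest) := by
        simp [leftScan]
      rw [h1, ih (c + 1) b rest]
      have h2 : c + 1 + (k : Int) = c + ((k : Nat) + 1 : Nat) := by push_cast; ring
      rw [h2, ascFrom, List.cons_append]

lemma leftScan_full (k : Nat) (hk : 1 ≤ k) (s : Bool) (rest : List Bool)
    (h : rest.head? ≠ some s) :
    leftScan none 0 (List.replicate k s ++ rest) = ascFrom 0 k ++ leftScan none 0 rest := by
  obtain ⟨m, rfl⟩ : ∃ m, k = m + 1 := ⟨k - 1, by omega⟩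
  rw [List.replicate_succ, List.cons_append]
  have h1 : leftScan none 0 (s :: (List.replicate m s ++ rest))
      = (0 + 1) :: leftScan (some s) (0 + 1) (List.replicate m s ++ rest) := by
    simp [leftScan]
  rw [h1, leftScan_run m (0 + 1) s rest, leftScan_restart s _ rest h, ascFrom, List.cons_append]

lemma rightScan_run : ∀ (k : Nat) (b : Bool) (rest : List Bool),
    rest.head? ≠ some b →
    rightScan (List.replicate k b ++ rest) = descInts k ++ rightScan rest := by
  intro k
  induction k with
  | zero => intro b rest h; simp [descInts]
  | succ k ih =>
      intro b rest h
      cases k with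
      | zero =>
          cases rest with
          | nil => simp [rightScan, descInts]
          | cons s r =>
              have hs : b ≠ s := by intro e; exact h (by simp [e])
              simp [rightScan, descInts, hs]
      | succ m =>
          have hrec := ih b rest h
          have hcons : List.replicate (m + 1) b ++ rest = b :: (List.replicate m b ++ rest) := by
            simp [List.replicate_succ]
          have harg : List.replicate (m + 1 + 1) b ++ rest
              = b :: (List.replicate (m + 1) b ++ rest) := by
            simp [List.replicate_succ]
          rw [harg]
          have h1 : rightScan (b :: (List.replicate (m + 1) b ++ rest))
              = ((rightScan (List.replicate (m + 1) b ++ rest)).headD 0 + 1)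
                  :: rightScan (List.replicate (m + 1) b ++ rest) := by
            rw [hcons]; simp [rightScan]
          rw [h1, hrec]
          rw [show descInts (m + 1) = (m : Int) :: descInts m from rfl]
          simp only [List.cons_append, List.headD_cons]
          rw [show descInts (m + 1 + 1) = ((m + 1 : Nat) : Int) :: (m : Int) :: descInts m from rfl]
          push_cast
          simp

lemma zip_asc_desc : ∀ (k : Nat) (c : Int),
    List.zipWith (· + ·) (ascFrom c k) (descInts k) = List.replicate k (c + k) := by
  intro k
  induction k with
  | zero => intro c; simp [ascFrom, descInts]
  | succ k ih =>
      intro c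
      rw [show ascFrom c (k + 1) = (c + 1) :: ascFrom (c + 1) k from rfl,
          show descInts (k + 1) = (k : Int) :: descInts k from rfl]
      simp only [List.zipWith_cons_cons, ih (c + 1), List.replicate_succ]
      have hc : c + 1 + (k : Int) = c + ((k : Nat) + 1 : Nat) := by push_cast; ring
      rw [hc]

lemma length_ascFrom : ∀ (k : Nat) (c : Int), (ascFrom c k).length = k := by
  intro k
  induction k with
  | zero => intro c; rfl
  | succ k ih => intro c; simp [ascFrom, ih]

lemma length_descInts : ∀ (k : Nat), (descInts k).length = k := by
  intro k
  induction k with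
  | zero => rfl
  | succ k ih => simp [descInts, ih]

lemma dropWhile_head_not {α : Type} (p : α → Bool) :
    ∀ (l : List α) (y : α) (r : List α), l.dropWhile p = y :: r → p y = false := by
  intro l
  induction l with
  | nil => intro y r h; simp [List.dropWhile] at h
  | cons a t ih =>
      intro y r h
      by_cases ha : p a
      · rw [List.dropWhile_cons_of_pos ha] at h; exact ih y r h
      · rw [List.dropWhile_cons_of_neg ha] at h
        obtain ⟨rfl, rfl⟩ : a = y ∧ t = r := by exact ⟨(List.cons.injEq _ _ _ _ ▸ h).1, (List.cons.injEq _ _ _ _ ▸ h).2⟩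
        simpa using ha

lemma tailB_eq : ∀ (n : Nat) (ss : List Bool), ss.length ≤ n →
    List.zipWith (· + ·) (leftScan none 0 ss) (rightScan ss) = runOut ss := by
  intro n
  induction n with
  | zero =>
      intro ss h
      have : ss = [] := List.eq_nil_of_length_eq_zero (Nat.le_zero.mp h)
      subst this; rfl
  | succ n ih =>
      intro ss hlen
      cases hss : ss with
      | nil => rfl
      | cons s t =>
          subst hss
          set k := ((s :: t).takeWhile (fun x => x == s)).length with hk
          set rest := (s :: t).dropWhile (fun x => x == s) with hrest
          have hsplit : s :: t = List.replicate k s ++ rest := by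
            rw [hk, hrest]
            conv_lhs => rw [← List.takeWhile_append_dropWhile (p := fun x => x == s) (l := s :: t)]
            congr 1
            apply List.eq_replicate_of_mem
            intro x hx
            have := List.mem_takeWhile_imp hx
            simpa using this
          have hk1 : 1 ≤ k := by
            rw [hk]; simp [List.takeWhile]
          have hhead : rest.head? ≠ some s := by
            cases hd : rest with
            | nil => simp
            | cons y r =>
                have hy : (fun x => x == s) y = false :=
                  dropWhile_head_not _ (s :: t) y r (hrest ▸ hd)
                simp only [beq_eq_false_iff_ne] at hy
                simp [hy]
          have hrestlen : rest.length ≤ n := by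
            have h1 : (List.replicate k s ++ rest).length = k + rest.length := by simp
            have h2 : (s :: t).length ≤ n + 1 := hlen
            rw [hsplit] at h2
            omega
          rw [hsplit]
          rw [leftScan_full k hk1 s rest hhead, rightScan_run k s rest hhead]
          rw [List.zipWith_append (by rw [length_ascFrom, length_descInts])]
          rw [zip_asc_desc, ih rest hrestlen]
          -- A-side: the first run of length k contributes k copies of k
          obtain ⟨m, hm⟩ : ∃ m, k = m + 1 := ⟨k - 1, by omega⟩
          rw [hm]
          conv_rhs => rw [List.replicate_succ, List.cons_append]
          rw [show runOut (s :: (List.replicate m s ++ rest)) = goA (List.replicate m s ++ rest) 1 s from rfl]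
          rw [goA_run m 1 s rest hhead]
          have hc : (1 : Int) + (m : Nat) = ((m + 1 : Nat) : Int) := by push_cast; ring
          rw [hc]
          simp [List.replicate_succ]

-- ===== VERDICT (by name: the statement is the Claim_ definition above) =====
theorem freqcalc_spec : Claim_equal_freqcalc := by
  intro l _
  show freqcalc l = freqcalc_alt l
  rw [freqcalc_eq_runOut, freqcalc_alt]
  exact (tailB_eq (pySigns l).length (pySigns l) le_rfl).symm
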